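-- pv_equiv track=rewrite | github.com/ryanjmccall/swe-cheatsheet | swe-cheatsheet/algorithms/lc/graph/circle_chained_words.py | is_chained
-- ===== SOURCE A (Python) =====
-- from collections import defaultdict
--
-- def is_chained(words):
--     symbol = defaultdict(list)
--     for w in words:
--         symbol[w[0]].append(w)
--
--     start = words[0]
--     visited = set()
--     def is_cycle_dfs(current: str, length: int) -> bool:
--         if length == 1:
--             return start[0] == current[-1]
--
--         visited.add(current)
--         for n in symbol[current[-1]]:
--             if n not in visited:
--                 return is_cycle_dfs(n, length - 1)
--
--         visited.remove(current)
--         return False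
--
--
--     return is_cycle_dfs(current=words[0], length=len(words))
-- ===== SOURCE B (Python) =====
-- from collections import deque
--
-- def is_chained(words):
--     # Iterative greedy walk. Buckets are deques consumed from the front:
--     # already-visited heads are popped once and never rescanned, so the
--     # whole walk does amortized O(1) bucket work per step.
--     buckets = {}
--     for w in words:
--         buckets.setdefault(w[0], deque()).append(w)
--     current = words[0]
--     visited = set()
--     for _ in range(len(words) - 1):
--         visited.add(current)
--         d = buckets.get(current[-1])
--         while d and d[0] in visited:
--             d.popleft()
--         if not d:
--             return False
--         current = d[0]
--     return words[0][0] == current[-1]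
-- ===== Notes on version B (the rewrite author's own statement) =====
-- stated objective: faster
-- what changed: Replaces the recursive DFS closure that rescans its defaultdict bucket from the start on every step with an iterative walk over front-consumed deque buckets: a visited head is popped once and never rescanned, making bucket work amortized O(1) per step instead of O(n).
import Mathlib
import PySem

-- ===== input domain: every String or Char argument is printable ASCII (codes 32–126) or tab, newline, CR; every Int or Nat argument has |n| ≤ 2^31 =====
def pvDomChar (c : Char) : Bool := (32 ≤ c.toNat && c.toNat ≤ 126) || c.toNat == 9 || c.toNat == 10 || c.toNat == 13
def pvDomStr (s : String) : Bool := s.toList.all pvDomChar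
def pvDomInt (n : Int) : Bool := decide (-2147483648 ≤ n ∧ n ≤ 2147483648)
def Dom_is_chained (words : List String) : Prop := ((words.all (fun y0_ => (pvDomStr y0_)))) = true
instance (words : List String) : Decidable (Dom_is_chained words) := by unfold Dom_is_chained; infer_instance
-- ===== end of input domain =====

-- B replaces A's recursive DFS that rescans its bucket from the start each step with an
-- iterative walk over front-consumed deque buckets (visited heads popped once, never rescanned).

-- w[0] / w[-1]; Pre_ guarantees every word is nonempty, so the default is never used inside Pre_
def firstC (w : String) : Char := w.toList.headD ' '
def lastC (w : String) : Char := w.toList.getLastD ' '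

-- ===== PORT A =====
-- symbol = defaultdict(list); for w in words: symbol[w[0]].append(w)
def buildSymbol (words : List String) : PySem.Dict Char (List String) :=
  words.foldl (fun d w => d.modify (firstC w) [] (fun l => l ++ [w])) PySem.Dict.empty

-- is_cycle_dfs(current, length); length = 0 is unreachable in Python (length starts at len(words) ≥ 1)
def dfsA (symbol : PySem.Dict Char (List String)) (start : String) :
    Nat → PySem.Set String → String → Bool
  | 0, _, _ => false
  | 1, _, current => firstC start == lastC current
  | (k+2), visited, current =>
    let visited' := PySem.Set.add visited current
    match (symbol.getD (lastC current) []).find? (fun n => !(PySem.Set.contains visited' n)) with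
    | some n => dfsA symbol start (k+1) visited' n
    | none => false

def is_chained (words : List String) : Bool :=
  dfsA (buildSymbol words) (words.headD "") words.length PySem.Set.empty (words.headD "")

-- ===== PORT B =====
-- buckets.setdefault(w[0], deque()).append(w); a deque is modelled as the list of its elements
def buildBuckets (words : List String) : PySem.Dict Char (List String) :=
  words.foldl (fun d w => d.insert (firstC w) (d.getD (firstC w) [] ++ [w])) PySem.Dict.empty

-- while d and d[0] in visited: d.popleft()
def popVisited (visited : PySem.Set String) : List String → List String
  | [] => []
  | x :: xs => if PySem.Set.contains visited x then popVisited visited xs else x :: xs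

-- the for-loop over range(len(words) - 1), counting remaining iterations; the deque mutation
-- d.popleft() is threaded as re-storing the shrunken bucket in the dict
def walkB (words : List String) :
    Nat → PySem.Dict Char (List String) → PySem.Set String → String → Bool
  | 0, _, _, current => firstC (words.headD "") == lastC current
  | (k+1), buckets, visited, current =>
    let visited' := PySem.Set.add visited current
    match popVisited visited' (buckets.getD (lastC current) []) with
    | [] => false
    | n :: rest => walkB words k (buckets.insert (lastC current) (n :: rest)) visited' n

def is_chained_alt (words : List String) : Bool :=
  walkB words (words.length - 1) (buildBuckets words) PySem.Set.empty (words.headD "")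

-- ===== PRECONDITION & SPEC =====
-- Pre_ excludes exactly the inputs where Python A raises IndexError: the empty list
-- (words[0]) and any empty word (w[0] while building symbol).
def Pre_is_chained (words : List String) : Prop := words ≠ [] ∧ ∀ w ∈ words, w ≠ ""
instance (words : List String) : Decidable (Pre_is_chained words) := by unfold Pre_is_chained; infer_instance

def pvWitness_is_chained : List String := ["ab", "ba"]

def Spec_is_chained (words : List String) (out : Bool) : Prop := out = is_chained_alt words
instance (words : List String) (out : Bool) : Decidable (Spec_is_chained words out) := by unfold Spec_is_chained; infer_instance

-- ===== CLAIM (what is proved, stated in full; the proofs are below) =====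
def Claim_equal_is_chained : Prop := ∀ (words : List String), Dom_is_chained words → Pre_is_chained words → Spec_is_chained words (is_chained words)

-- ===== LEMMAS AND PROOFS =====

-- A's defaultdict buckets keep list order: bucket c = the words whose first char is c, in order.
theorem bucket_eq (words : List String) (c : Char) :
    ∀ d : PySem.Dict Char (List String),
      (words.foldl (fun d w => d.modify (firstC w) [] (fun l => l ++ [w])) d).getD c []
        = d.getD c [] ++ words.filter (fun w => firstC w == c) := by
  induction words with
  | nil => intro d; simp
  | cons w ws ih =>
    intro d
    simp only [List.foldl_cons, List.filter_cons]
    rw [ih]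
    by_cases h : firstC w = c
    · subst h
      simp [PySem.Dict.getD_modify_self]
    · have h' : (firstC w == c) = false := by simp [h]
      rw [PySem.Dict.getD_modify, if_neg (fun hc => h hc.symm)]
      simp [h']

-- B's setdefault/append loop builds the same buckets.
theorem bucketB_eq (words : List String) (c : Char) :
    ∀ d : PySem.Dict Char (List String),
      (words.foldl (fun d w => d.insert (firstC w) (d.getD (firstC w) [] ++ [w])) d).getD c []
        = d.getD c [] ++ words.filter (fun w => firstC w == c) := by
  induction words with
  | nil => intro d; simp
  | cons w ws ih =>
    intro d
    simp only [List.foldl_cons, List.filter_cons]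
    rw [ih]
    by_cases h : firstC w = c
    · subst h
      simp [PySem.Dict.getD_insert_self]
    · have h' : (firstC w == c) = false := by simp [h]
      rw [PySem.Dict.getD_insert, if_neg (fun hc => h hc.symm)]
      simp [h']

theorem contains_add_of_contains (s : PySem.Set String) (x y : String)
    (h : PySem.Set.contains s y = true) : PySem.Set.contains (PySem.Set.add s x) y = true := by
  unfold PySem.Set.add
  split <;> simp_all [PySem.Set.contains]

-- the popped prefix consists of visited words, and popping is a suffix operation
theorem popVisited_decomp (v : PySem.Set String) :
    ∀ b : List String, ∃ pre, b = pre ++ popVisited v b ∧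
      ∀ x ∈ pre, PySem.Set.contains v x = true := by
  intro b
  induction b with
  | nil => exact ⟨[], rfl, by simp⟩
  | cons x xs ih =>
    by_cases h : PySem.Set.contains v x
    · obtain ⟨pre, hpre, hv⟩ := ih
      have hpv : popVisited v (x :: xs) = popVisited v xs := by
        simp only [popVisited]; rw [if_pos h]
      refine ⟨x :: pre, ?_, ?_⟩
      · rw [hpv, List.cons_append, ← hpre]
      · intro y hy
        rcases List.mem_cons.mp hy with rfl | hy
        · exact h
        · exact hv y hy
    · refine ⟨[], ?_, by simp⟩
      simp only [popVisited]; rw [if_neg h]; rfl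

-- scanning the full bucket for the first unvisited word = head of the front-popped bucket,
-- provided everything already popped is visited
theorem find?_eq_head_popVisited (v : PySem.Set String) :
    ∀ (pre rest : List String), (∀ x ∈ pre, PySem.Set.contains v x = true) →
      (pre ++ rest).find? (fun n => !(PySem.Set.contains v n)) = (popVisited v rest).head? := by
  intro pre
  induction pre with
  | nil =>
    intro rest _
    induction rest with
    | nil => rfl
    | cons x xs ihr =>
      by_cases h : PySem.Set.contains v x
      · rw [List.nil_append, List.find?_cons_of_neg (by simpa using h),
            show popVisited v (x :: xs) = popVisited v xs by
              simp only [popVisited]; rw [if_pos h]]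
        simpa using ihr
      · rw [List.nil_append, List.find?_cons_of_pos (by simpa using h),
            show popVisited v (x :: xs) = x :: xs by
              simp only [popVisited]; rw [if_neg h]]
        rfl
  | cons p ps ih =>
    intro rest hv
    have hp : PySem.Set.contains v p = true := hv p (by simp)
    rw [List.cons_append, List.find?_cons_of_neg (by simpa using hp)]
    exact ih rest (fun x hx => hv x (by simp [hx]))

-- the walk invariant: every stored bucket is a suffix of the full bucket whose dropped
-- prefix is entirely visited
def BInv (words : List String) (buckets : PySem.Dict Char (List String))
    (visited : PySem.Set String) : Prop :=
  ∀ c : Char, ∃ pre, words.filter (fun w => firstC w == c) = pre ++ buckets.getD c [] ∧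
    ∀ x ∈ pre, PySem.Set.contains visited x = true

theorem dfsA_eq_walkB (words : List String) :
    ∀ (k : Nat) (buckets : PySem.Dict Char (List String)) (visited : PySem.Set String)
      (current : String), BInv words buckets visited →
      dfsA (buildSymbol words) (words.headD "") (k + 1) visited current
        = walkB words k buckets visited current := by
  intro k
  induction k with
  | zero => intro _ _ _ _; rfl
  | succ k ih =>
    intro buckets visited current hinv
    show dfsA _ _ (k + 2) visited current = walkB words (k + 1) buckets visited current
    rw [dfsA, walkB]
    set c := lastC current with hc
    set visited' := PySem.Set.add visited current with hv'
    obtain ⟨pre, hpre, hvis⟩ := hinv c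
    have hvis' : ∀ x ∈ pre, PySem.Set.contains visited' x = true :=
      fun x hx => contains_add_of_contains _ _ _ (hvis x hx)
    have hsym : (buildSymbol words).getD c [] = words.filter (fun w => firstC w == c) := by
      have := bucket_eq words c PySem.Dict.empty
      simpa [buildSymbol] using this
    rw [hsym, hpre, find?_eq_head_popVisited visited' pre (buckets.getD c []) hvis']
    obtain ⟨dropped, hdrop, hdropv⟩ := popVisited_decomp visited' (buckets.getD c [])
    cases hpop : popVisited visited' (buckets.getD c []) with
    | nil => rfl
    | cons n rest =>
      simp only [List.head?]
      apply ih
      -- re-establish the invariant for the updated buckets and visited'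
      intro c'
      by_cases hcc : c' = c
      · subst hcc
        refine ⟨pre ++ dropped, ?_, ?_⟩
        · rw [PySem.Dict.getD_insert, if_pos rfl, hpre, hdrop, hpop]
          simp
        · intro x hx
          rcases List.mem_append.mp hx with hx | hx
          · exact hvis' x hx
          · exact hdropv x hx
      · obtain ⟨pre', hpre', hvis'2⟩ := hinv c'
        refine ⟨pre', ?_, fun x hx => contains_add_of_contains _ _ _ (hvis'2 x hx)⟩
        rw [PySem.Dict.getD_insert, if_neg hcc]
        exact hpre'

-- ===== VERDICT (by name: the statement is the Claim_ definition above) =====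
theorem is_chained_spec : Claim_equal_is_chained := by
  intro words _ hpre
  unfold Spec_is_chained is_chained is_chained_alt
  obtain ⟨hne, -⟩ := hpre
  have hlen : words.length = (words.length - 1) + 1 := by
    cases words with
    | nil => exact absurd rfl hne
    | cons _ _ => simp
  conv_lhs => rw [hlen]
  apply dfsA_eq_walkB
  intro c
  refine ⟨[], ?_, by simp⟩
  have := bucketB_eq words c PySem.Dict.empty
  simp [buildBuckets, this]
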